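-- pv_equiv track=rewrite | github.com/jqodiriy/tokenizer | reverse_tokenize.py | build_string_with_substrings
-- ===== SOURCE A (Python) =====
-- def build_string_with_substrings(substring_list, target_string):
--     def backtrack(start_index, current_path):
--         if start_index == len(target_string):
--             result.append(list(current_path))
--             return
--
--         for substring in substring_list:
--             original_substring = substring
--             if start_index == 0 and original_substring.startswith("##"):
--                 continue
--
--             if original_substring.startswith("##"):
--                 substring = original_substring[2:]
--
--             if target_string.startswith(substring, start_index):
--                 current_path.append(original_substring)
--                 backtrack(start_index + len(substring), current_path)
--                 current_path.pop()
--
--     result = []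
--     backtrack(0, [])
--
--     return result
-- ===== SOURCE B (Python) =====
-- def build_string_with_substrings(substring_list, target_string):
--     n = len(target_string)
--     # table[i] = all tokenizations of target_string[i:] under the inner rule
--     # ('##'-prefixed tokens match their stripped form); tokens with empty
--     # effective content can never appear in a finite tokenization, so skip them.
--     table = [[] for _ in range(n + 1)]
--     table[n] = [[]]
--     for i in range(n - 1, 0, -1):
--         row = []
--         for tok in substring_list:
--             eff = tok[2:] if tok.startswith("##") else tok
--             if eff and target_string.startswith(eff, i):
--                 row.extend([tok] + rest for rest in table[i + len(eff)])
--         table[i] = row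
--     if n == 0:
--         return [[]]
--     out = []
--     for tok in substring_list:
--         if tok and not tok.startswith("##") and target_string.startswith(tok):
--             out.extend([tok] + rest for rest in table[len(tok)])
--     return out
-- ===== Notes on version B (the rewrite author's own statement) =====
-- stated objective: alternative
-- what changed: Replaces A's recursive backtracking (which re-explores each suffix from scratch) with a bottom-up dynamic-programming table holding, for each position i, all tokenizations of target_string[i:], then reads the answer off the table at position 0 with the no-'##'-at-start rule; tokens of empty effective content ('' and '##'), which can never occur in a finite tokenization, are skipped.
import Mathlib
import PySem

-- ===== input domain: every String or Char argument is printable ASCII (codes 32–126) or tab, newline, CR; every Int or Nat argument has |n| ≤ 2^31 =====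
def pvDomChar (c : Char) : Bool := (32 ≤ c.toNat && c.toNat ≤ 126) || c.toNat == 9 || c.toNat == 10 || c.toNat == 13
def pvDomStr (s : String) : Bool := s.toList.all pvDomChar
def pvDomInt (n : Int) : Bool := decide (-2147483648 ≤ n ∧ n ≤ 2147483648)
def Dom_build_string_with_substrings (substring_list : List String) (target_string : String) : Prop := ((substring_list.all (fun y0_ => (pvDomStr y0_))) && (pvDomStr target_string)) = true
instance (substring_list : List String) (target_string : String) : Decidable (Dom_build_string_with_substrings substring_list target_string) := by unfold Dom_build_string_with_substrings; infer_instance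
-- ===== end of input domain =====

-- B replaces A's recursive dead-end backtracking by a bottom-up table of all
-- tokenizations of each suffix, read off at position 0 (alternative algorithm).

-- `tok[2:] if tok.startswith("##") else tok` (both Pythons compute this the same way)
def pvEff (s : String) : List Char :=
  if ['#', '#'].isPrefixOf s.toList then s.toList.drop 2 else s.toList

-- ===== PORT A =====
-- A's recursive `backtrack`; `fuel` only totalizes the recursion (Python's
-- recursion raises RecursionError exactly on the inputs excluded by Pre_).
def btA (subs : List String) (tgt : List Char) :
    Nat → Nat → List String → List (List String) → List (List String)
  | 0, _, _, result => result
  | fuel + 1, start, path, result =>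
    if start = tgt.length then result ++ [path]
    else
      subs.foldl (fun res s =>
        if start = 0 ∧ ['#', '#'].isPrefixOf s.toList then res
        else
          let sub := pvEff s
          if sub.isPrefixOf (tgt.drop start) then
            btA subs tgt fuel (start + sub.length) (path ++ [s]) res
          else res) result

def build_string_with_substrings (substring_list : List String) (target_string : String) : List (List String) :=
  btA substring_list target_string.toList (target_string.toList.length + 1) 0 [] []

-- ===== PORT B =====
-- one inner row: all tokenizations of tgt[i:] read off the already-built table
-- (tokens of empty effective content are skipped, as in Source B)
def rowB (subs : List String) (tgt : List Char) (i : Nat)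
    (table : List (List (List String))) : List (List String) :=
  subs.foldl (fun row s =>
    let eff := pvEff s
    if eff ≠ [] ∧ eff.isPrefixOf (tgt.drop i) then
      row ++ (table.getD (i + eff.length) []).map (fun rest => s :: rest)
    else row) []

-- the table after k iterations of B's `for i in range(n-1, 0, -1)` loop
def tabB (subs : List String) (tgt : List Char) : Nat → List (List (List String))
  | 0 => List.replicate tgt.length [] ++ [[[]]]
  | k + 1 =>
    let t := tabB subs tgt k
    t.set (tgt.length - 1 - k) (rowB subs tgt (tgt.length - 1 - k) t)

def build_string_with_substrings_alt (substring_list : List String) (target_string : String) : List (List String) :=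
  let tgt := target_string.toList
  let n := tgt.length
  if n = 0 then [[]]
  else
    let table := tabB substring_list tgt (n - 1)
    substring_list.foldl (fun out s =>
      if s.toList ≠ [] ∧ ¬ (['#', '#'].isPrefixOf s.toList) ∧ s.toList.isPrefixOf tgt then
        out ++ (table.getD s.toList.length []).map (fun rest => s :: rest)
      else out) []

-- ===== PRECONDITION & SPEC =====
-- Pre_ excludes exactly the inputs on which Python A raises RecursionError:
-- a nonempty target together with "" in the list (an empty token matches at
-- position 0 forever), or with "##" in the list while some non-"##"-prefixed
-- token is a proper prefix of the target (so an interior position is reached,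
-- where "##" matches its empty stripped form forever).
def Pre_build_string_with_substrings (substring_list : List String) (target_string : String) : Prop :=
  target_string = "" ∨
    ("" ∉ substring_list ∧
      ("##" ∉ substring_list ∨
        ¬ ∃ s ∈ substring_list, ¬ ['#', '#'].isPrefixOf s.toList ∧
          s.toList.isPrefixOf target_string.toList ∧ s.toList.length < target_string.toList.length))
instance (substring_list : List String) (target_string : String) : Decidable (Pre_build_string_with_substrings substring_list target_string) := by unfold Pre_build_string_with_substrings; infer_instance

def pvWitness_build_string_with_substrings : List String × String := (["ab", "##b", "a"], "aab")

def Spec_build_string_with_substrings (substring_list : List String) (target_string : String) (out : List (List String)) : Prop := out = build_string_with_substrings_alt substring_list target_string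
instance (substring_list : List String) (target_string : String) (out : List (List String)) : Decidable (Spec_build_string_with_substrings substring_list target_string out) := by unfold Spec_build_string_with_substrings; infer_instance

-- ===== CLAIM (what is proved, stated in full; the proofs are below) =====
def Claim_equal_build_string_with_substrings : Prop := ∀ (substring_list : List String) (target_string : String), Dom_build_string_with_substrings substring_list target_string → Pre_build_string_with_substrings substring_list target_string → Spec_build_string_with_substrings substring_list target_string (build_string_with_substrings substring_list target_string)

-- ===== LEMMAS AND PROOFS =====

-- proof-only names for the inline fold bodies
def fA (subs : List String) (tgt : List Char) (fuel start : Nat) (path : List String) :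
    List (List String) → String → List (List String) := fun res s =>
  if start = 0 ∧ ['#', '#'].isPrefixOf s.toList then res
  else
    let sub := pvEff s
    if sub.isPrefixOf (tgt.drop start) then
      btA subs tgt fuel (start + sub.length) (path ++ [s]) res
    else res

def gB (tgt : List Char) (i : Nat) (table : List (List (List String))) :
    List (List String) → String → List (List String) := fun row s =>
  let eff := pvEff s
  if eff ≠ [] ∧ eff.isPrefixOf (tgt.drop i) then
    row ++ (table.getD (i + eff.length) []).map (fun rest => s :: rest)
  else row

def gTop (tgt : List Char) (table : List (List (List String))) :
    List (List String) → String → List (List String) := fun out s =>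
  if s.toList ≠ [] ∧ ¬ (['#', '#'].isPrefixOf s.toList) ∧ s.toList.isPrefixOf tgt then
    out ++ (table.getD s.toList.length []).map (fun rest => s :: rest)
  else out

lemma btA_succ (subs : List String) (tgt : List Char) (fuel start : Nat)
    (path : List String) (result : List (List String)) :
    btA subs tgt (fuel + 1) start path result =
      if start = tgt.length then result ++ [path]
      else subs.foldl (fA subs tgt fuel start path) result := rfl

lemma rowB_eq (subs : List String) (tgt : List Char) (i : Nat)
    (table : List (List (List String))) :
    rowB subs tgt i table = subs.foldl (gB tgt i table) [] := rfl

lemma alt_eq (subs : List String) (t : String) (hn : ¬ t.toList.length = 0) :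
    build_string_with_substrings_alt subs t =
      subs.foldl (gTop t.toList (tabB subs t.toList (t.toList.length - 1))) [] := by
  show (if t.toList.length = 0 then _ else _) = _
  rw [if_neg hn]
  rfl

-- a token whose effective content is empty is "" or "##"
lemma pvEff_ne_nil {s : String} (h1 : s ≠ "") (h2 : s ≠ "##") : pvEff s ≠ [] := by
  unfold pvEff
  split
  · rename_i h
    obtain ⟨rest, hr⟩ := List.isPrefixOf_iff_prefix.mp h
    intro hc
    rw [← hr] at hc
    have hrest : rest = [] := by simpa using hc
    apply h2
    apply String.toList_inj.mp
    rw [← hr, hrest]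
    rfl
  · intro hc
    apply h1
    apply String.toList_inj.mp
    rw [hc]
    rfl

lemma tabB_length (subs : List String) (tgt : List Char) (k : Nat) :
    (tabB subs tgt k).length = tgt.length + 1 := by
  induction k with
  | zero => simp [tabB]
  | succ k ih => simpa [tabB] using ih

-- entries at index ≥ n - a are already final after a iterations
lemma tabB_stable (subs : List String) (tgt : List Char) {a b j : Nat}
    (hab : a ≤ b) (hb : b ≤ tgt.length - 1) (hj : tgt.length - a ≤ j) :
    (tabB subs tgt b).getD j [] = (tabB subs tgt a).getD j [] := by
  induction b with
  | zero => have : a = 0 := Nat.le_zero.mp hab; subst this; rfl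
  | succ b ih =>
    rcases Nat.lt_or_ge a (b + 1) with h | h
    · have hab' : a ≤ b := Nat.lt_succ_iff.mp h
      have hb' : b ≤ tgt.length - 1 := le_trans (Nat.le_succ b) hb
      rw [← ih hab' hb']
      have hne : tgt.length - 1 - b ≠ j := by omega
      simp [tabB, List.getD, List.getElem?_set_ne hne]
    · have : a = b + 1 := le_antisymm hab h
      subst this; rfl

lemma entry_last (subs : List String) (tgt : List Char) (hn : 1 ≤ tgt.length) :
    (tabB subs tgt (tgt.length - 1)).getD tgt.length [] = [[]] := by
  rw [tabB_stable subs tgt (Nat.zero_le _) (le_refl _) (by omega)]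
  simp [tabB, List.getD]

lemma entry_mid (subs : List String) (tgt : List Char)
    {i : Nat} (h1 : 1 ≤ i) (h2 : i < tgt.length) :
    (tabB subs tgt (tgt.length - 1)).getD i [] =
      rowB subs tgt i (tabB subs tgt (tgt.length - 1)) := by
  set n := tgt.length with hn
  set k := n - 1 - i with hk
  have hik : n - 1 - k = i := by omega
  have hb := tabB_stable subs tgt (a := k + 1) (b := n - 1) (j := i) (by omega) (le_refl _) (by omega)
  have ha : (tabB subs tgt (k + 1)).getD i [] = rowB subs tgt i (tabB subs tgt k) := by
    show ((tabB subs tgt k).set (n - 1 - k) (rowB subs tgt (n - 1 - k) (tabB subs tgt k))).getD i [] = _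
    rw [hik]
    have hlt : i < (tabB subs tgt k).length := by rw [tabB_length]; omega
    simp [List.getD, hlt]
  rw [hb, ha, rowB_eq, rowB_eq]
  -- the row read from the partial table equals the row read from the final table
  have hcong : ∀ (l : List String) (row : List (List String)),
      l.foldl (gB tgt i (tabB subs tgt k)) row =
      l.foldl (gB tgt i (tabB subs tgt (n - 1))) row := by
    intro l
    induction l with
    | nil => intro _; rfl
    | cons s l ihl =>
      intro row
      simp only [List.foldl_cons]
      have hstep : gB tgt i (tabB subs tgt k) row s = gB tgt i (tabB subs tgt (n - 1)) row s := by
        unfold gB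
        by_cases hp : pvEff s ≠ [] ∧ (pvEff s).isPrefixOf (tgt.drop i)
        · rw [if_pos hp, if_pos hp]
          have hl1 : 1 ≤ (pvEff s).length := List.length_pos_iff.mpr hp.1
          rw [tabB_stable subs tgt (a := k) (b := n - 1) (j := i + (pvEff s).length)
            (by omega) (le_refl _) (by omega)]
        · rw [if_neg hp, if_neg hp]
      rw [hstep]
      exact ihl _
  exact (hcong subs []).symm ▸ rfl

-- main invariant (used when every token has nonempty effective content):
-- A's backtracking from position i ≥ 1 appends exactly the table entry for i,
-- each solution prefixed by the current path
lemma btA_eq_entry (subs : List String) (tgt : List Char)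
    (hP : ∀ s ∈ subs, pvEff s ≠ []) :
    ∀ (fuel i : Nat) (path : List String) (res : List (List String)),
      1 ≤ i → i ≤ tgt.length → tgt.length - i < fuel →
      btA subs tgt fuel i path res =
        res ++ ((tabB subs tgt (tgt.length - 1)).getD i []).map (fun r => path ++ r) := by
  intro fuel
  induction fuel with
  | zero => intro i path res h1 h2 h3; omega
  | succ fuel ih =>
    intro i path res h1 h2 h3
    rcases eq_or_lt_of_le h2 with he | hlt
    · rw [btA_succ, if_pos he, he, entry_last subs tgt (by omega)]
      simp
    · rw [btA_succ, if_neg (by omega), entry_mid subs tgt h1 hlt, rowB_eq]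
      have key : ∀ (l : List String), (∀ s ∈ l, pvEff s ≠ []) →
          ∀ (row res' : List (List String)),
          l.foldl (fA subs tgt fuel i path) (res' ++ row.map (fun r => path ++ r)) =
          res' ++ (l.foldl (gB tgt i (tabB subs tgt (tgt.length - 1))) row).map (fun r => path ++ r) := by
        intro l
        induction l with
        | nil => intro _ _ _; rfl
        | cons s l ihl =>
          intro h row res'
          have hs := h s (List.mem_cons_self ..)
          simp only [List.foldl_cons]
          have h0 : ¬ (i = 0 ∧ ['#', '#'].isPrefixOf s.toList) := by
            rintro ⟨h', _⟩; omega
          by_cases hp : (pvEff s).isPrefixOf (tgt.drop i)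
          · have hl1 : 1 ≤ (pvEff s).length := List.length_pos_iff.mpr hs
            have hle : (pvEff s).length ≤ tgt.length - i := by
              have := (List.isPrefixOf_iff_prefix.mp hp).length_le
              simpa using this
            have hfa : fA subs tgt fuel i path (res' ++ row.map (fun r => path ++ r)) s =
                res' ++ (row ++ ((tabB subs tgt (tgt.length - 1)).getD (i + (pvEff s).length) []).map
                  (fun rest => s :: rest)).map (fun r => path ++ r) := by
              unfold fA
              rw [if_neg h0, if_pos hp,
                ih (i + (pvEff s).length) (path ++ [s]) _ (by omega) (by omega) (by omega)]
              simp [List.map_map, Function.comp_def]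
            have hgb : gB tgt i (tabB subs tgt (tgt.length - 1)) row s =
                row ++ ((tabB subs tgt (tgt.length - 1)).getD (i + (pvEff s).length) []).map
                  (fun rest => s :: rest) := by
              unfold gB; rw [if_pos ⟨hs, hp⟩]
            rw [hfa, hgb]
            exact ihl (fun x hx => h x (List.mem_cons_of_mem _ hx)) _ res'
          · have hfa : fA subs tgt fuel i path (res' ++ row.map (fun r => path ++ r)) s =
                res' ++ row.map (fun r => path ++ r) := by
              unfold fA; rw [if_neg h0, if_neg hp]
            have hgb : gB tgt i (tabB subs tgt (tgt.length - 1)) row s = row := by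
              unfold gB; rw [if_neg (by rintro ⟨_, h'⟩; exact hp h')]
            rw [hfa, hgb]
            exact ihl (fun x hx => h x (List.mem_cons_of_mem _ hx)) row res'
      have := key subs hP [] res
      simpa using this

-- the two top-level loops agree when every token has nonempty effective content
lemma fold_zero (subs : List String) (tgt : List Char)
    (hP : ∀ s ∈ subs, pvEff s ≠ []) :
    ∀ (l : List String), (∀ s ∈ l, pvEff s ≠ []) → ∀ (acc : List (List String)),
      l.foldl (fA subs tgt tgt.length 0 []) acc =
      l.foldl (gTop tgt (tabB subs tgt (tgt.length - 1))) acc := by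
  intro l
  induction l with
  | nil => intro _ _; rfl
  | cons s l ihl =>
    intro h acc
    have hs := h s (List.mem_cons_self ..)
    simp only [List.foldl_cons]
    have hstep : fA subs tgt tgt.length 0 [] acc s =
        gTop tgt (tabB subs tgt (tgt.length - 1)) acc s := by
      unfold fA gTop
      by_cases hpp : ['#', '#'].isPrefixOf s.toList
      · rw [if_pos ⟨rfl, hpp⟩, if_neg (by simp [hpp])]
      · rw [if_neg (by rintro ⟨_, h'⟩; exact hpp h')]
        have heff : pvEff s = s.toList := by unfold pvEff; rw [if_neg hpp]
        have hne : s.toList ≠ [] := by rw [← heff]; exact hs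
        by_cases hp : s.toList.isPrefixOf tgt
        · rw [if_pos (by simpa [heff] using hp), if_pos ⟨hne, hpp, hp⟩]
          have hl1 : 1 ≤ s.toList.length := List.length_pos_iff.mpr hne
          have hle : s.toList.length ≤ tgt.length :=
            (List.isPrefixOf_iff_prefix.mp hp).length_le
          rw [btA_eq_entry subs tgt hP tgt.length (0 + (pvEff s).length) ([] ++ [s]) acc
            (by rw [heff]; omega) (by rw [heff]; omega) (by rw [heff]; omega)]
          simp [heff]
        · rw [if_neg (by simpa [heff] using hp), if_neg (by rintro ⟨_, _, h'⟩; exact hp h')]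
    rw [hstep]
    exact ihl (fun x hx => h x (List.mem_cons_of_mem _ hx)) _

-- the two top-level loops agree when no non-"##" non-empty token is a proper
-- prefix of the target (every match at position 0 covers the whole target)
lemma fold_short (subs : List String) (tgt : List Char) (hn : 1 ≤ tgt.length)
    (hns : ¬ ∃ s ∈ subs, ¬ ['#', '#'].isPrefixOf s.toList ∧
      s.toList.isPrefixOf tgt ∧ s.toList.length < tgt.length)
    (hne : "" ∉ subs) :
    ∀ (l : List String), (∀ s ∈ l, s ∈ subs) → ∀ (acc : List (List String)),
      l.foldl (fA subs tgt tgt.length 0 []) acc =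
      l.foldl (gTop tgt (tabB subs tgt (tgt.length - 1))) acc := by
  intro l
  induction l with
  | nil => intro _ _; rfl
  | cons s l ihl =>
    intro h acc
    have hsub := h s (List.mem_cons_self ..)
    simp only [List.foldl_cons]
    have hstep : fA subs tgt tgt.length 0 [] acc s =
        gTop tgt (tabB subs tgt (tgt.length - 1)) acc s := by
      unfold fA gTop
      by_cases hpp : ['#', '#'].isPrefixOf s.toList
      · rw [if_pos ⟨rfl, hpp⟩, if_neg (by simp [hpp])]
      · rw [if_neg (by rintro ⟨_, h'⟩; exact hpp h')]
        have heff : pvEff s = s.toList := by unfold pvEff; rw [if_neg hpp]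
        have hsne : s.toList ≠ [] := by
          intro hc
          exact hne (by have : s = "" := String.toList_inj.mp (by simpa using hc); rwa [← this])
        by_cases hp : s.toList.isPrefixOf tgt
        · -- the match must cover the whole target
          have hlen : s.toList.length = tgt.length := by
            have hle := (List.isPrefixOf_iff_prefix.mp hp).length_le
            rcases Nat.lt_or_ge s.toList.length tgt.length with hlt | hge
            · exact absurd ⟨s, hsub, hpp, hp, hlt⟩ hns
            · omega
          rw [if_pos (by simpa [heff] using hp), if_pos ⟨hsne, hpp, hp⟩]
          have hbase : btA subs tgt tgt.length (0 + (pvEff s).length) ([] ++ [s]) acc =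
              acc ++ [[s]] := by
            rw [heff, hlen]
            cases hfu : tgt.length with
            | zero => omega
            | succ m =>
              rw [← hfu]
              have : tgt.length = m + 1 := hfu
              rw [this]
              rw [btA_succ, if_pos (by omega)]
              simp
          rw [hbase, hlen, entry_last subs tgt hn]
          simp
        · rw [if_neg (by simpa [heff] using hp), if_neg (by rintro ⟨_, _, h'⟩; exact hp h')]
    rw [hstep]
    exact ihl (fun x hx => h x (List.mem_cons_of_mem _ hx)) _

lemma eff_empty_cases {s : String} (hc : pvEff s = []) : s = "" ∨ s = "##" := by
  by_cases h1 : s = ""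
  · exact Or.inl h1
  · by_cases h2 : s = "##"
    · exact Or.inr h2
    · exact absurd hc (pvEff_ne_nil h1 h2)

-- ===== VERDICT (by name: the statement is the Claim_ definition above) =====
theorem build_string_with_substrings_spec : Claim_equal_build_string_with_substrings := by
  intro subs t _ hpre
  unfold Spec_build_string_with_substrings
  by_cases hn : t.toList.length = 0
  · have ht : t.toList = [] := List.length_eq_zero_iff.mp hn
    unfold build_string_with_substrings build_string_with_substrings_alt
    rw [ht]
    rfl
  · have hne : "" ∉ subs ∧ ("##" ∉ subs ∨
        ¬ ∃ s ∈ subs, ¬ ['#', '#'].isPrefixOf s.toList ∧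
          s.toList.isPrefixOf t.toList ∧ s.toList.length < t.toList.length) := by
      rcases hpre with h | h
      · exact absurd (by rw [h]; rfl) hn
      · exact h
    rw [alt_eq subs t hn]
    unfold build_string_with_substrings
    rw [btA_succ, if_neg (by omega)]
    by_cases hP : ∀ s ∈ subs, pvEff s ≠ []
    · exact fold_zero subs t.toList hP subs hP []
    · -- some token has empty effective content: it must be "##", and then
      -- Pre_ says no interior position is reachable
      push Not at hP
      obtain ⟨s0, hs0, hc0⟩ := hP
      rcases eff_empty_cases hc0 with he | he
      · exact absurd (he ▸ hs0) hne.1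
      · have hns : ¬ ∃ s ∈ subs, ¬ ['#', '#'].isPrefixOf s.toList ∧
            s.toList.isPrefixOf t.toList ∧ s.toList.length < t.toList.length := by
          rcases hne.2 with h | h
          · exact absurd (he ▸ hs0) h
          · exact h
        exact fold_short subs t.toList (by omega) hns hne.1 subs (fun _ hx => hx) []
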